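-- pv_equiv track=rewrite | github.com/nveen2/SE_Assignments_SPPU_syllabus | Assgnmnts_sem3/DSA/3233_Spaarse matrix.py | maToSparse
-- ===== SOURCE A (Python) =====
-- def maToSparse(mat, r , c):
--     ans = []
--     for i in range(0,r):
--         for j in range(0,c):
--             if(mat[i][j] != 0):
--                 ans.append((i,j,mat[i][j]))
--     transpose = []
--     for j in range(0,c):
--         for i in range(0,r):
--             if(mat[i][j] != 0):
--                 transpose.append((j,i,mat[i][j]))
--     return ans,transpose
-- ===== SOURCE B (Python) =====
-- def maToSparse(mat, r, c):
--     ans = []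
--     for i, row in enumerate(mat):
--         if i >= r:
--             break
--         for j, v in enumerate(row):
--             if j >= c:
--                 break
--             if v != 0:
--                 ans.append((i, j, v))
--     # stable sort by column: within one column the row order of ans is kept
--     transpose = sorted(((j, i, v) for (i, j, v) in ans), key=lambda t: t[0])
--     return ans, transpose
-- ===== Notes on version B (the rewrite author's own statement) =====
-- stated objective: alternative
-- what changed: B makes a single structural pass over the matrix rows (enumerate with break, no index arithmetic) to build ans, then obtains the transpose by a stable sort of the index-swapped ans by column key instead of A's second full column-major rescan of the matrix.
import Mathlib
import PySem

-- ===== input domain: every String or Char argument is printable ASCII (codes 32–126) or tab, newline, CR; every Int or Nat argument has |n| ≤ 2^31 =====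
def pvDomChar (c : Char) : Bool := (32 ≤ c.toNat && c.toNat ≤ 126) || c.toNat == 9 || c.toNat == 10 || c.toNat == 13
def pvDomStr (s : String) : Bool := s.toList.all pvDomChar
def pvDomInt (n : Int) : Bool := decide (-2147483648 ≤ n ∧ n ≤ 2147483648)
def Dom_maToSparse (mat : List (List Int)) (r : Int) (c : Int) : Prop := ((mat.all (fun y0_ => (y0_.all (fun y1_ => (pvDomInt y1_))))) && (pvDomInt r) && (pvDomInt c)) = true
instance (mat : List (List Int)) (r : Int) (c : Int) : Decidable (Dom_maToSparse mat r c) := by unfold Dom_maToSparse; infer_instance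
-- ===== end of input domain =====

-- B builds ans in one structural pass over the rows and gets the transpose by a stable sort of the swapped ans by column, instead of A's second column-major rescan; objective: alternative.

-- ===== PORT A =====
def maToSparse (mat : List (List Int)) (r : Int) (c : Int) : (List (Int × Int × Int)) × (List (Int × Int × Int)) :=
  let ans := (PySem.List.pyRange 0 r 1).foldl (fun acc i =>
    (PySem.List.pyRange 0 c 1).foldl (fun acc j =>
      if PySem.List.pyGetD (PySem.List.pyGetD mat i []) j 0 ≠ 0 then
        acc ++ [(i, j, PySem.List.pyGetD (PySem.List.pyGetD mat i []) j 0)]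
      else acc) acc) []
  let transpose := (PySem.List.pyRange 0 c 1).foldl (fun acc j =>
    (PySem.List.pyRange 0 r 1).foldl (fun acc i =>
      if PySem.List.pyGetD (PySem.List.pyGetD mat i []) j 0 ≠ 0 then
        acc ++ [(j, i, PySem.List.pyGetD (PySem.List.pyGetD mat i []) j 0)]
      else acc) acc) []
  (ans, transpose)

-- ===== PORT B =====
-- inner loop of B: 'for j, v in enumerate(row): if j >= c: break; if v != 0: append (i, j, v)'
def pvRowItems (i c : Int) : List Int → Int → List (Int × Int × Int)
  | [], _ => []
  | v :: rest, j => if c ≤ j then [] else (if v ≠ 0 then [(i, j, v)] else []) ++ pvRowItems i c rest (j + 1)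

-- outer loop of B: 'for i, row in enumerate(mat): if i >= r: break; …'
def pvAnsRows (r c : Int) : List (List Int) → Int → List (Int × Int × Int)
  | [], _ => []
  | row :: rest, i => if r ≤ i then [] else pvRowItems i c row 0 ++ pvAnsRows r c rest (i + 1)

def maToSparse_alt (mat : List (List Int)) (r : Int) (c : Int) : (List (Int × Int × Int)) × (List (Int × Int × Int)) :=
  let ans := pvAnsRows r c mat 0
  let transpose := PySem.List.sorted (ans.map (fun t => (t.2.1, t.1, t.2.2))) (fun t => t.1) false
  (ans, transpose)

-- ===== PRECONDITION & SPEC =====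
-- Pre_ excludes exactly the inputs where Python A raises IndexError: 0 < r and 0 < c while some accessed row index i < r or column index j < c is out of range.
def Pre_maToSparse (mat : List (List Int)) (r : Int) (c : Int) : Prop :=
  r ≤ 0 ∨ c ≤ 0 ∨ (r ≤ (mat.length : Int) ∧ ∀ row ∈ mat.take r.toNat, c ≤ (row.length : Int))
instance (mat : List (List Int)) (r : Int) (c : Int) : Decidable (Pre_maToSparse mat r c) := by unfold Pre_maToSparse; infer_instance
def pvWitness_maToSparse : List (List Int) × Int × Int := ([[1, 0], [0, 2]], 2, 2)

def Spec_maToSparse (mat : List (List Int)) (r : Int) (c : Int) (out : (List (Int × Int × Int)) × (List (Int × Int × Int))) : Prop := out = maToSparse_alt mat r c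
instance (mat : List (List Int)) (r : Int) (c : Int) (out : (List (Int × Int × Int)) × (List (Int × Int × Int))) : Decidable (Spec_maToSparse mat r c out) := by unfold Spec_maToSparse; infer_instance

-- ===== CLAIM (what is proved, stated in full; the proofs are below) =====
def Claim_equal_maToSparse : Prop := ∀ (mat : List (List Int)) (r : Int) (c : Int), Dom_maToSparse mat r c → Pre_maToSparse mat r c → Spec_maToSparse mat r c (maToSparse mat r c)

-- ===== LEMMAS AND PROOFS =====

-- abbreviation used only in the proofs
def pvV (mat : List (List Int)) (i j : Int) : Int := PySem.List.pyGetD (PySem.List.pyGetD mat i []) j 0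

-- canonical form of A's first loop
theorem ansA_eq (mat : List (List Int)) (r c : Int) :
    (maToSparse mat r c).1 = (PySem.List.pyRange 0 r 1).flatMap (fun i =>
      ((PySem.List.pyRange 0 c 1).filter (fun j => decide (pvV mat i j ≠ 0))).map (fun j => (i, j, pvV mat i j))) := by
  simp only [maToSparse, pvV,
    PySem.List.foldl_append_ite (p := fun j => _ ≠ (0 : Int)),
    PySem.List.foldl_append_eq_flatMap, List.nil_append]
  rfl

-- canonical form of A's second loop
theorem trA_eq (mat : List (List Int)) (r c : Int) :
    (maToSparse mat r c).2 = (PySem.List.pyRange 0 c 1).flatMap (fun j =>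
      ((PySem.List.pyRange 0 r 1).filter (fun i => decide (pvV mat i j ≠ 0))).map (fun i => (j, i, pvV mat i j))) := by
  simp only [maToSparse, pvV,
    PySem.List.foldl_append_ite (p := fun i => _ ≠ (0 : Int)),
    PySem.List.foldl_append_eq_flatMap, List.nil_append]
  rfl

theorem flatMap_congr_mem {α β : Type} (l : List α) (f g : α → List β) (h : ∀ x ∈ l, f x = g x) :
    l.flatMap f = l.flatMap g := by
  induction l with
  | nil => rfl
  | cons a l ih => simp [List.flatMap_cons, h a (by simp), ih fun x hx => h x (by simp [hx])]

theorem pvRowItems_c_nonpos (i c : Int) (row : List Int) (j : Int) (h : c ≤ j) :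
    pvRowItems i c row j = [] := by
  cases row <;> simp [pvRowItems, h]

theorem pvAnsRows_c_nonpos (r c : Int) (hc : c ≤ 0) (rows : List (List Int)) (i : Int) :
    pvAnsRows r c rows i = [] := by
  induction rows generalizing i with
  | nil => rfl
  | cons row rest ih =>
      by_cases h : r ≤ i
      · simp [pvAnsRows, h]
      · simp [pvAnsRows, h, pvRowItems_c_nonpos i c row 0 hc, ih]

theorem pvAnsRows_r_le (r c : Int) (rows : List (List Int)) (i : Int) (h : r ≤ i) :
    pvAnsRows r c rows i = [] := by
  cases rows <;> simp [pvAnsRows, h]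

-- B's inner loop over the tail of a row equals A's filtered range over the same columns
theorem pvRowItems_spec (full : List Int) (i c : Int) (hc : c ≤ (full.length : Int)) :
    ∀ (row : List Int) (j : Int), 0 ≤ j → row = full.drop j.toNat →
      pvRowItems i c row j = ((PySem.List.pyRange j c 1).filter
          (fun jj => decide (PySem.List.pyGetD full jj 0 ≠ 0))).map
          (fun jj => (i, jj, PySem.List.pyGetD full jj 0)) := by
  intro row
  induction row with
  | nil =>
      intro j hj hdrop
      have hlen : full.length ≤ j.toNat := by
        by_contra h
        have := List.drop_eq_nil_iff.mp hdrop.symm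
        omega
      have : c ≤ j := by omega
      simp [pvRowItems, PySem.List.pyRange_one_eq_nil this]
  | cons v rest ih =>
      intro j hj hdrop
      by_cases h : c ≤ j
      · simp [pvRowItems, h, PySem.List.pyRange_one_eq_nil h]
      · have hjc : j < c := lt_of_not_ge h
        have hjlen : j.toNat < full.length := by
          by_contra hh
          have : full.drop j.toNat = [] := List.drop_eq_nil_iff.mpr (by omega)
          rw [this] at hdrop
          exact (List.cons_ne_nil v rest) hdrop
        have h1 : full.drop j.toNat = v :: rest := hdrop.symm
        have hgd : full.getD j.toNat 0 = v := by
          have h5 : (full.drop j.toNat).getD 0 0 = v := by rw [h1]; rfl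
          rw [List.getD_eq_getElem?_getD, List.getElem?_drop] at h5
          rw [List.getD_eq_getElem?_getD]
          simpa using h5
        have hv : PySem.List.pyGetD full j 0 = v := by
          have h3 : ((j.toNat : Nat) : Int) = j := by omega
          rw [← h3, PySem.List.pyGetD_natCast]
          exact hgd
        have hrest : rest = full.drop (j + 1).toNat := by
          have : (j + 1).toNat = j.toNat + 1 := by omega
          rw [this, ← List.drop_drop]
          simp [← hdrop]
        rw [pvRowItems, if_neg h, PySem.List.pyRange_one_cons hjc,
          List.filter_cons, ih (j + 1) (by omega) hrest]
        by_cases hv0 : v ≠ 0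
        · simp [hv, hv0]
        · simp only [ne_eq, not_not] at hv0
          simp [hv, hv0]

-- B's outer loop over the remaining rows equals A's filtered double range
theorem pvAnsRows_spec (mat : List (List Int)) (r c : Int)
    (hr : r ≤ (mat.length : Int)) (hrows : ∀ row ∈ mat.take r.toNat, c ≤ (row.length : Int)) :
    ∀ (rows : List (List Int)) (i : Int), 0 ≤ i → rows = mat.drop i.toNat →
      pvAnsRows r c rows i = (PySem.List.pyRange i r 1).flatMap (fun ii =>
        ((PySem.List.pyRange 0 c 1).filter (fun j => decide (pvV mat ii j ≠ 0))).map
          (fun j => (ii, j, pvV mat ii j))) := by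
  intro rows
  induction rows with
  | nil =>
      intro i hi hdrop
      have hlen : mat.length ≤ i.toNat := by
        by_contra h
        have := List.drop_eq_nil_iff.mp hdrop.symm
        omega
      have : r ≤ i := by omega
      simp [pvAnsRows, PySem.List.pyRange_one_eq_nil this]
  | cons row rest ih =>
      intro i hi hdrop
      by_cases h : r ≤ i
      · simp [pvAnsRows, h, PySem.List.pyRange_one_eq_nil h]
      · have hir : i < r := lt_of_not_ge h
        have hilen : i.toNat < mat.length := by omega
        have h1 : mat.drop i.toNat = row :: rest := hdrop.symm
        have hgd : mat.getD i.toNat [] = row := by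
          have h5 : (mat.drop i.toNat).getD 0 [] = row := by rw [h1]; rfl
          rw [List.getD_eq_getElem?_getD, List.getElem?_drop] at h5
          rw [List.getD_eq_getElem?_getD]
          simpa using h5
        have hrow : PySem.List.pyGetD mat i [] = row := by
          have h3 : ((i.toNat : Nat) : Int) = i := by omega
          rw [← h3, PySem.List.pyGetD_natCast]
          exact hgd
        have hgetElem : mat[i.toNat]'hilen = row := by
          rw [← List.getD_eq_getElem (d := ([] : List Int)) mat hilen]
          exact hgd
        have hmem : row ∈ mat.take r.toNat :=
          List.mem_take_iff_getElem.mpr ⟨i.toNat, by omega, hgetElem⟩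
        have hc : c ≤ (row.length : Int) := hrows row hmem
        have hrest : rest = mat.drop (i + 1).toNat := by
          have : (i + 1).toNat = i.toNat + 1 := by omega
          rw [this, ← List.drop_drop]
          simp [← hdrop]
        rw [pvAnsRows, if_neg h, PySem.List.pyRange_one_cons hir, List.flatMap_cons,
          ih (i + 1) (by omega) hrest]
        congr 1
        have := pvRowItems_spec row i c hc row 0 le_rfl (by simp)
        rw [this]
        simp [pvV, hrow]

-- the value of B's ans agrees with A's ans on Pre_
theorem ansB_eq (mat : List (List Int)) (r c : Int) (hpre : Pre_maToSparse mat r c) :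
    (maToSparse_alt mat r c).1 = (maToSparse mat r c).1 := by
  rw [ansA_eq]
  show pvAnsRows r c mat 0 = _
  by_cases hc : c ≤ 0
  · rw [pvAnsRows_c_nonpos r c hc mat 0]
    rw [flatMap_congr_mem _ _ (fun _ => []) (by intro x _; simp [PySem.List.pyRange_one_eq_nil hc])]
    simp
  · by_cases hr : r ≤ 0
    · rw [pvAnsRows_r_le r c mat 0 hr, PySem.List.pyRange_one_eq_nil hr]
      simp
    · rcases hpre with h | h | ⟨h1, h2⟩
      · omega
      · omega
      · exact pvAnsRows_spec mat r c h1 h2 mat 0 le_rfl (by simp)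

-- ===== stable-sort machinery =====

theorem insertBy_pass {α : Type} (bf : α → α → Bool) (x : α) (p q : List α)
    (hp : ∀ y ∈ p, bf x y = false) :
    PySem.List.insertBy bf x (p ++ q) = p ++ PySem.List.insertBy bf x q := by
  induction p with
  | nil => rfl
  | cons a p ih =>
      rw [List.cons_append, PySem.List.insertBy, hp a (by simp)]
      simp [ih fun y hy => hp y (by simp [hy])]

theorem insertBy_front {α : Type} (bf : α → α → Bool) (x : α) (q : List α)
    (hq : ∀ y ∈ q, bf x y = true) :
    PySem.List.insertBy bf x q = x :: q := by
  cases q with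
  | nil => rfl
  | cons a q => rw [PySem.List.insertBy, hq a (by simp)]; simp

theorem insertBy_grouped {α κ : Type} [LinearOrder κ] (key : α → κ) (J : List κ)
    (g : κ → List α) (x : α) (hJ : J.Pairwise (· < ·))
    (hg : ∀ k ∈ J, ∀ y ∈ g k, key y = k) (hx : key x ∈ J) :
    PySem.List.insertBy (fun a b => decide (key a < key b)) x (J.flatMap g) =
      J.flatMap (fun k => if k = key x then g k ++ [x] else g k) := by
  induction J with
  | nil => simp at hx
  | cons k J ih =>
      rcases List.pairwise_cons.mp hJ with ⟨hk, hJ'⟩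
      rw [List.flatMap_cons, List.flatMap_cons]
      have hpass : ∀ y ∈ g k, (fun a b => decide (key a < key b)) x y = false := by
        intro y hy
        have hky : key y = k := hg k (by simp) y hy
        rcases List.mem_cons.mp hx with h | h
        · simp [hky, ← h]
        · have hlt : k < key x := hk _ h
          have hnot : ¬ key x < key y := by rw [hky]; exact not_lt.mpr hlt.le
          simpa using hnot
      rw [insertBy_pass _ _ _ _ hpass]
      by_cases hkx : k = key x
      · have hfront : ∀ y ∈ J.flatMap g, (fun a b => decide (key a < key b)) x y = true := by
          intro y hy
          rcases List.mem_flatMap.mp hy with ⟨k', hk', hy'⟩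
          have hyk : key y = k' := hg k' (by simp [hk']) y hy'
          have hlt : key x < key y := by rw [← hkx, hyk]; exact hk _ hk'
          simpa using hlt
        rw [insertBy_front _ _ _ hfront, if_pos hkx]
        have : J.flatMap (fun k' => if k' = key x then g k' ++ [x] else g k') = J.flatMap g := by
          apply flatMap_congr_mem
          intro k' hk'
          have hlt : key x < k' := hkx ▸ hk _ hk'
          simp [ne_of_gt hlt]
        rw [this]; simp
      · have hx' : key x ∈ J := by
          rcases List.mem_cons.mp hx with h | h
          · exact absurd h.symm hkx
          · exact h
        rw [ih hJ' (fun k' hk' => hg k' (by simp [hk'])) hx', if_neg hkx]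

-- a stable sort groups equal keys in input order
theorem sorted_grouped {α κ : Type} [LinearOrder κ] (key : α → κ) (J : List κ)
    (hJ : J.Pairwise (· < ·)) (xs : List α) (hxs : ∀ x ∈ xs, key x ∈ J) :
    PySem.List.sorted xs key false = J.flatMap (fun k => xs.filter (fun x => decide (key x = k))) := by
  induction xs using List.reverseRecOn with
  | nil => simp [PySem.List.sorted_eq_foldl_insertBy]
  | append_singleton ys x ih =>
      have hys : ∀ y ∈ ys, key y ∈ J := fun y hy => hxs y (by simp [hy])
      have hstep : PySem.List.sorted (ys ++ [x]) key false =
          PySem.List.insertBy (fun a b => decide (key a < key b)) x (PySem.List.sorted ys key false) := by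
        rw [PySem.List.sorted_eq_foldl_insertBy, PySem.List.sorted_eq_foldl_insertBy, List.foldl_append]
        rfl
      rw [hstep, ih hys,
        insertBy_grouped key J _ x hJ
          (fun k _ y hy => by
            have := List.mem_filter.mp hy
            exact of_decide_eq_true this.2)
          (hxs x (by simp))]
      apply flatMap_congr_mem
      intro k hk
      rw [List.filter_append]
      by_cases h : k = key x
      · simp [h]
      · have : key x ≠ k := fun hh => h hh.symm
        simp [h, this]

theorem filter_pair_eq_of_nodup {α : Type} [DecidableEq α] (l : List α) (hl : l.Nodup)
    (j : α) (hj : j ∈ l) (p : α → Bool) :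
    l.filter (fun x => decide (x = j) && p x) = if p j then [j] else [] := by
  induction l with
  | nil => simp at hj
  | cons a l ih =>
      rcases List.nodup_cons.mp hl with ⟨ha, hl'⟩
      by_cases h : a = j
      · subst h
        have hnil : l.filter (fun x => decide (x = a) && p x) = [] := by
          apply List.filter_eq_nil_iff.mpr
          intro x hx
          have : x ≠ a := fun hh => ha (hh ▸ hx)
          simp [this]
        rw [List.filter_cons]
        by_cases hp : p a <;> simp [hp, hnil]
      · have hj' : j ∈ l := by
          rcases List.mem_cons.mp hj with hh | hh
          · exact absurd hh.symm h
          · exact hh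
        rw [List.filter_cons]
        simp [h, ih hl' hj']

theorem filter_map_eq_flatMap {α β : Type} (p : α → Bool) (f : α → β) (l : List α) :
    (l.filter p).map f = l.flatMap (fun x => if p x then [f x] else []) := by
  induction l with
  | nil => rfl
  | cons a l ih => by_cases h : p a <;> simp [h, ih]

theorem filter_flatMap {α β : Type} (l : List α) (f : α → List β) (p : β → Bool) :
    (l.flatMap f).filter p = l.flatMap (fun x => (f x).filter p) := by
  induction l with
  | nil => rfl
  | cons a l ih => simp [List.flatMap_cons, List.filter_append, ih]

-- B's transpose (stable sort of the swapped ans by column) equals A's column-major scan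
theorem trB_eq (mat : List (List Int)) (r c : Int) (hpre : Pre_maToSparse mat r c) :
    (maToSparse_alt mat r c).2 = (maToSparse mat r c).2 := by
  show PySem.List.sorted ((pvAnsRows r c mat 0).map (fun t => (t.2.1, t.1, t.2.2))) (fun t => t.1) false = _
  have hans : pvAnsRows r c mat 0 = (maToSparse mat r c).1 := ansB_eq mat r c hpre
  rw [hans, ansA_eq, trA_eq]
  set F : Int → List (Int × Int × Int) := fun i =>
    ((PySem.List.pyRange 0 c 1).filter (fun j => decide (pvV mat i j ≠ 0))).map
      (fun j => (i, j, pvV mat i j)) with hF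
  have hkeys : ∀ x ∈ ((PySem.List.pyRange 0 r 1).flatMap F).map (fun t => (t.2.1, t.1, t.2.2)),
      (fun t : Int × Int × Int => t.1) x ∈ PySem.List.pyRange 0 c 1 := by
    intro x hx
    rcases List.mem_map.mp hx with ⟨t, ht, hxt⟩
    rcases List.mem_flatMap.mp ht with ⟨i, _, hti⟩
    rcases List.mem_map.mp hti with ⟨j, hj, htj⟩
    have := List.mem_filter.mp hj
    subst hxt; subst htj
    exact this.1
  rw [sorted_grouped _ (PySem.List.pyRange 0 c 1) (PySem.List.pairwise_lt_pyRange_one 0 c) _ hkeys]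
  apply flatMap_congr_mem
  intro j hj
  rw [List.filter_map, filter_flatMap, List.map_flatMap, filter_map_eq_flatMap]
  apply flatMap_congr_mem
  intro i _
  rw [hF]
  simp only [List.filter_map, List.map_map, List.filter_filter, Function.comp_def]
  have hfun : (fun jj : Int => decide ((i, jj, pvV mat i jj).2.1 = j) && decide (pvV mat i jj ≠ 0)) =
      (fun jj : Int => decide (jj = j) && decide (pvV mat i jj ≠ 0)) := by
    funext jj; rfl
  rw [hfun, filter_pair_eq_of_nodup _ (PySem.List.nodup_pyRange_one 0 c) j hj
      (fun jj => decide (pvV mat i jj ≠ 0))]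
  by_cases hv : pvV mat i j ≠ 0
  · simp [hv]
  · simp only [ne_eq, not_not] at hv
    simp [hv]

-- ===== VERDICT (by name: the statement is the Claim_ definition above) =====
theorem maToSparse_spec : Claim_equal_maToSparse := by
  intro mat r c _ hpre
  unfold Spec_maToSparse
  exact Prod.ext (ansB_eq mat r c hpre).symm (trB_eq mat r c hpre).symm
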